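-- pv_equiv track=rewrite | github.com/petersmythe/geoserver | scripts/fix_backslash_escapes.py | _in_code_span
-- ===== SOURCE A (Python) =====
-- def _in_code_span(line, pos):
--     """Check if position pos in line is inside a backtick code span."""
--     in_code = False
--     i = 0
--     while i < len(line) and i < pos:
--         if line[i] == '`':
--             # Count consecutive backticks
--             j = i + 1
--             while j < len(line) and line[j] == '`':
--                 j += 1
--             ticks = j - i
--             if in_code:
--                 in_code = False
--             else:
--                 in_code = True
--             i = j
--         else:
--             i += 1
--     return in_code
-- ===== SOURCE B (Python) =====
-- def _in_code_span(line, pos):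
--     """Check if position pos in line is inside a backtick code span."""
--     starts = [i for i, c in enumerate(line)
--               if c == '`' and (i == 0 or line[i - 1] != '`')]
--     return sum(1 for s in starts if s < pos) % 2 == 1
-- ===== Notes on version B (the rewrite author's own statement) =====
-- stated objective: simpler
-- what changed: Replaces A's manual while-loop state machine (index i, nested backtick-skipping loop j, toggled flag) by a comprehension enumerating maximal backtick-run start positions and returning the parity of those strictly before pos.
import Mathlib
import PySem

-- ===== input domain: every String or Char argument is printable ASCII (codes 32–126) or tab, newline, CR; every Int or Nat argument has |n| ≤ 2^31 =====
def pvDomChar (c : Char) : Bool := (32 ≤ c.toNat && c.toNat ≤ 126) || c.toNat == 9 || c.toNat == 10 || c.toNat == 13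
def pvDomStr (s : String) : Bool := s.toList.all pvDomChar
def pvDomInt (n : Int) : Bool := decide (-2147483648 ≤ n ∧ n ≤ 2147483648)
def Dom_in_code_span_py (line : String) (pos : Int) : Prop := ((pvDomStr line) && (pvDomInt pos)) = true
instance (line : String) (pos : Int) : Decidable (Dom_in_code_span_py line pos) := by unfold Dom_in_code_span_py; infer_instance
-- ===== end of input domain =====

-- B replaces A's manual index/state-machine scan by enumerating maximal backtick-run
-- starts with a comprehension and returning the parity of those before pos (objective: simpler).

-- ===== PORT A =====
-- inner while loop: 'while j < len(line) and line[j] == '`': j += 1'; returns the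
-- remaining suffix together with the final j
def pvSkipTicks : List Char → Int → List Char × Int
  | [], j => ([], j)
  | c :: t, j => if c = '`' then pvSkipTicks t (j + 1) else (c :: t, j)

theorem pvSkipTicks_len_le : ∀ (t : List Char) (j : Int), (pvSkipTicks t j).1.length ≤ t.length := by
  intro t
  induction t with
  | nil => intro j; simp [pvSkipTicks]
  | cons c t ih =>
      intro j
      by_cases hc : c = '`' <;> simp [pvSkipTicks, hc]
      · exact le_trans (ih (j + 1)) (Nat.le_succ _)

-- outer while loop over the remaining suffix of the line (index i carried explicitly)
def pvALoop : List Char → Int → Int → Bool → Bool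
  | [], _, _, in_code => in_code
  | c :: t, i, pos, in_code =>
    if i < pos then
      if c = '`' then
        pvALoop (pvSkipTicks t (i + 1)).1 (pvSkipTicks t (i + 1)).2 pos (!in_code)
      else
        pvALoop t (i + 1) pos in_code
    else in_code
termination_by t => t.length
decreasing_by
  · exact Nat.lt_succ_of_le (pvSkipTicks_len_le t (i + 1))
  · simp

def in_code_span_py (line : String) (pos : Int) : Bool :=
  pvALoop line.toList 0 pos false

-- ===== PORT B =====
def in_code_span_py_alt (line : String) (pos : Int) : Bool :=
  let cs := line.toList
  let starts :=
    (PySem.List.enumerate cs).filter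
      (fun ic => ic.2 = '`' ∧ (ic.1 = 0 ∨ PySem.List.pyGet? cs (ic.1 - 1) ≠ some '`'))
  decide ((starts.filter (fun ic => ic.1 < pos)).length % 2 = 1)

-- ===== PRECONDITION & SPEC =====
def Spec_in_code_span_py (line : String) (pos : Int) (out : Bool) : Prop := out = in_code_span_py_alt line pos
instance (line : String) (pos : Int) (out : Bool) : Decidable (Spec_in_code_span_py line pos out) := by unfold Spec_in_code_span_py; infer_instance

-- ===== CLAIM (what is proved, stated in full; the proofs are below) =====
def Claim_equal_in_code_span_py : Prop := ∀ (line : String) (pos : Int), Dom_in_code_span_py line pos → Spec_in_code_span_py line pos (in_code_span_py line pos)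

-- ===== LEMMAS AND PROOFS =====

-- canonical count of maximal backtick-run starts (at absolute index ≥ i, with flag
-- 'prev' saying whether the char just before the suffix is a backtick) that lie < pos
def pvCanon : List Char → Bool → Int → Int → Nat
  | [], _, _, _ => 0
  | c :: t, prev, i, pos =>
    (if c = '`' ∧ prev = false ∧ i < pos then 1 else 0) + pvCanon t (decide (c = '`')) (i + 1) pos

theorem pvCanon_zero (t : List Char) (b : Bool) (i pos : Int) (h : pos ≤ i) :
    pvCanon t b i pos = 0 := by
  induction t generalizing b i with
  | nil => simp [pvCanon]
  | cons c t ih =>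
      simp only [pvCanon]
      rw [if_neg (fun h' => absurd h'.2.2 (not_lt.mpr h)), ih _ _ (by omega)]

theorem pvCanon_prev_irrel (t : List Char) (b b' : Bool) (i pos : Int)
    (h : t = [] ∨ ∀ c t', t = c :: t' → c ≠ '`') :
    pvCanon t b i pos = pvCanon t b' i pos := by
  cases t with
  | nil => rfl
  | cons c t =>
      have hc : c ≠ '`' := by
        rcases h with h | h
        · simp at h
        · exact h c t rfl
      simp [pvCanon, hc]

theorem pvSkipTicks_head (t : List Char) (j : Int) :
    (pvSkipTicks t j).1 = [] ∨ ∀ c t', (pvSkipTicks t j).1 = c :: t' → c ≠ '`' := by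
  induction t generalizing j with
  | nil => simp [pvSkipTicks]
  | cons c t ih =>
      by_cases hc : c = '`'
      · simpa [pvSkipTicks, hc] using ih (j + 1)
      · right; intro c' t' h
        simp [pvSkipTicks, hc] at h
        intro hcon; exact hc (h.1 ▸ hcon)

theorem pvSkipTicks_canon (t : List Char) (j pos : Int) :
    pvCanon t true j pos = pvCanon (pvSkipTicks t j).1 true (pvSkipTicks t j).2 pos := by
  induction t generalizing j with
  | nil => simp [pvSkipTicks]
  | cons c t ih =>
      by_cases hc : c = '`'
      · simp [pvSkipTicks, hc, pvCanon, ih (j + 1)]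
      · simp [pvSkipTicks, hc]

theorem pvALoop_eq_canon (t : List Char) (i pos : Int) (inc : Bool) :
    pvALoop t i pos inc = xor inc (decide (pvCanon t false i pos % 2 = 1)) := by
  induction t, i, pos, inc using pvALoop.induct with
  | case1 => simp [pvALoop, pvCanon]
  | case2 a b c d e f =>
      have h1 : pvCanon ('`' :: a) false b c
          = 1 + pvCanon (pvSkipTicks a (b + 1)).1 false (pvSkipTicks a (b + 1)).2 c := by
        have h2 := pvSkipTicks_canon a (b + 1) c
        have h3 := pvCanon_prev_irrel (pvSkipTicks a (b + 1)).1 true false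
          (pvSkipTicks a (b + 1)).2 c (pvSkipTicks_head a (b + 1))
        simp [pvCanon, e]
        rw [h2, h3]
      rw [show pvALoop ('`' :: a) b c d
            = pvALoop (pvSkipTicks a (b + 1)).1 (pvSkipTicks a (b + 1)).2 c (!d) from by
          simp [pvALoop, e], f, h1]
      cases d <;> cases Nat.even_or_odd (pvCanon (pvSkipTicks a (b + 1)).1 false (pvSkipTicks a (b + 1)).2 c) <;>
        simp_all [Nat.even_iff, Nat.odd_iff, Nat.add_mod]
  | case3 a b c d e g h ih =>
      simp [pvALoop, pvCanon, g, h, ih]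
  | case4 a b c d e h =>
      simp [pvALoop, h, pvCanon_zero (a :: b) false c d (by omega)]

theorem pvB_gen (cs : List Char) (pos : Int) :
    ∀ (t : List Char) (k : Nat), cs.drop k = t →
    ((PySem.List.enumerate t (k : Int)).filter
        (fun ic => decide (((ic.2 = '`' ∧ (ic.1 = 0 ∨ PySem.List.pyGet? cs (ic.1 - 1) ≠ some '`')) ∧ ic.1 < pos)))).length
      = pvCanon t (decide (k ≠ 0 ∧ PySem.List.pyGet? cs ((k : Int) - 1) = some '`')) (k : Int) pos := by
  intro t
  induction t with
  | nil => intro k hk; simp [PySem.List.enumerate_nil, pvCanon]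
  | cons c t ih =>
      intro k hk
      have hget : PySem.List.pyGet? cs (k : Int) = some c := by
        rw [PySem.List.pyGet?_natCast]
        have : (cs.drop k)[0]? = some c := by rw [hk]; rfl
        simpa using this
      have hdrop : cs.drop (k + 1) = t := by
        have h2 : List.drop 1 (List.drop k cs) = List.drop (k + 1) cs := List.drop_drop
        rw [← h2, hk]; rfl
      have ih' := ih (k + 1) hdrop
      have hnext : (decide ((k + 1 : Nat) ≠ 0 ∧ PySem.List.pyGet? cs (((k + 1 : Nat) : Int) - 1) = some '`'))
          = decide (c = '`') := by
        have h3 : (((k + 1 : Nat) : Int) - 1) = (k : Int) := by push_cast; ring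
        rw [h3, hget]
        by_cases hc : c = '`' <;> simp [hc]
      rw [hnext] at ih'
      have hc1 : ((k : Int) + 1) = (((k + 1 : Nat)) : Int) := by push_cast; ring
      have hiff : ((c = '`' ∧ ((k : Int) = 0 ∨ PySem.List.pyGet? cs ((k : Int) - 1) ≠ some '`')) ∧ (k : Int) < pos)
          ↔ (c = '`' ∧ (decide (k ≠ 0 ∧ PySem.List.pyGet? cs ((k : Int) - 1) = some '`')) = false ∧ (k : Int) < pos) := by
        by_cases h0 : k = 0 <;> by_cases hp : PySem.List.pyGet? cs ((k : Int) - 1) = some '`' <;>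
          simp [h0, hp]
      rw [PySem.List.enumerate_cons, List.filter_cons]
      simp only [pvCanon]
      by_cases hQ : (c = '`' ∧ (decide (k ≠ 0 ∧ PySem.List.pyGet? cs ((k : Int) - 1) = some '`')) = false ∧ (k : Int) < pos)
      · rw [if_pos (decide_eq_true (hiff.mpr hQ)), if_pos hQ, List.length_cons, hc1, ih']
        omega
      · rw [if_neg (by simpa using (fun h => hQ (hiff.mp h))), if_neg hQ, hc1, ih']
        omega

-- ===== VERDICT (by name: the statement is the Claim_ definition above) =====
theorem in_code_span_py_spec : Claim_equal_in_code_span_py := by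
  intro line pos _
  unfold Spec_in_code_span_py in_code_span_py in_code_span_py_alt
  rw [pvALoop_eq_canon]
  have h := pvB_gen line.toList pos line.toList 0 rfl
  simp only [List.filter_filter, Bool.decide_and, Nat.cast_zero, ne_eq, not_true_eq_false,
    false_and, decide_false, Bool.false_xor] at h ⊢
  have e : List.filter
        (fun a : Int × Char => decide (a.1 < pos) &&
          (decide (a.2 = '`') && decide (a.1 = 0 ∨ ¬PySem.List.pyGet? line.toList (a.1 - 1) = some '`')))
        (PySem.List.enumerate line.toList 0)
      = List.filter
        (fun ic : Int × Char => decide (ic.2 = '`') &&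
          decide (ic.1 = 0 ∨ ¬PySem.List.pyGet? line.toList (ic.1 - 1) = some '`') && decide (ic.1 < pos))
        (PySem.List.enumerate line.toList 0) := by
    apply List.filter_congr
    intro a _
    rw [Bool.and_comm]
  rw [e, h]
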